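-- pv_equiv track=rewrite | github.com/EsdrasAlbino/laboratory | python/AulaIp - Python/Recursion/recursion_4_gpt.py | calculate_derivative
-- ===== SOURCE A (Python) =====
-- def calculate_derivative(coefficients, K):
--     if K == 0:
--         return coefficients
--
--     new_coefficients = [0] * len(coefficients)
--
--     for i in range(len(coefficients)):
--         if coefficients[i] != 0:
--             new_coefficients[i - 1] = i * coefficients[i]
--
--     return calculate_derivative(new_coefficients, K - 1)
-- ===== SOURCE B (Python) =====
-- def calculate_derivative(coefficients, K):
--     if K == 0:
--         return coefficients
--     n = len(coefficients)
--     result = [0] * n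
--     for j in range(n):
--         if j + K < n:
--             factor = 1
--             for m in range(j + 1, j + K + 1):
--                 factor *= m
--             result[j] = coefficients[j + K] * factor
--     return result
-- ===== Notes on version B (the rewrite author's own statement) =====
-- stated objective: alternative
-- what changed: B replaces A's K-fold recursive application of the single-derivative transform by one direct pass that computes each output coefficient via a falling-factorial product coefficients[j+K]*(j+1)*...*(j+K), so no intermediate coefficient lists are built.
-- outside the precondition, e.g. on calculate_derivative([1, 2, 3], 980): A returns [0, 0, 0], B returns [0, 0, 0]
import Mathlib
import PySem

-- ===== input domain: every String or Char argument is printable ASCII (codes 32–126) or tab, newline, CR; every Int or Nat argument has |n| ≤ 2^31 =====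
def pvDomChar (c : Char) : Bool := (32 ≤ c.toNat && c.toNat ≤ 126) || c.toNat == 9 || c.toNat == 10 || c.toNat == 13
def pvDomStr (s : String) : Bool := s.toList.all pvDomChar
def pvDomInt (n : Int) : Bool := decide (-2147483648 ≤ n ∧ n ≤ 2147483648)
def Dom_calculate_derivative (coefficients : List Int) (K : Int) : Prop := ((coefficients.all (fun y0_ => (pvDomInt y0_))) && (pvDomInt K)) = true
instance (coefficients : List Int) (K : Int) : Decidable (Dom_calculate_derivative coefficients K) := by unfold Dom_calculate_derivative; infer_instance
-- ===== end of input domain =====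

-- B computes each output coefficient directly as coefficients[j+K]*(j+1)*...*(j+K) in one
-- pass instead of A's K-fold recursive application of the single-derivative transform.

-- ===== PORT A =====
-- A's for-loop: new_coefficients[i-1] = i * coefficients[i] when coefficients[i] != 0.
-- i and i-1 are always in range when the loop body runs (i-1 = -1 wraps to the last slot),
-- so the total pyGetD/pySetD forms are exact here.
def derivStep (c : List Int) : List Int :=
  (PySem.List.pyRange 0 (c.length : Int) 1).foldl
    (fun nw i =>
      if PySem.List.pyGetD c i 0 ≠ 0 then
        PySem.List.pySetD nw (i - 1) (i * PySem.List.pyGetD c i 0)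
      else nw)
    (List.replicate c.length 0)

-- A's recursion 'calculate_derivative(new_coefficients, K - 1)', run on fuel = K.toNat;
-- for the K ≥ 0 the claim covers the fuel is never exhausted (for K < 0 the Python A raises).
def calcAux (fuel : Nat) (c : List Int) (K : Int) : List Int :=
  if K = 0 then c
  else match fuel with
    | 0 => c
    | f + 1 => calcAux f (derivStep c) (K - 1)

def calculate_derivative (coefficients : List Int) (K : Int) : List Int :=
  calcAux K.toNat coefficients K

-- ===== PORT B =====
-- factor = (j+1)*(j+2)*...*(j+K)
def fallingProd (j K : Int) : Int :=
  (PySem.List.pyRange (j + 1) (j + K + 1) 1).foldl (fun acc m => acc * m) 1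

def calculate_derivative_alt (coefficients : List Int) (K : Int) : List Int :=
  if K = 0 then coefficients
  else
    (PySem.List.pyRange 0 (coefficients.length : Int) 1).foldl
      (fun res j =>
        if j + K < (coefficients.length : Int) then
          PySem.List.pySetD res j (PySem.List.pyGetD coefficients (j + K) 0 * fallingProd j K)
        else res)
      (List.replicate coefficients.length 0)

-- ===== PRECONDITION & SPEC =====
-- A recurses once per derivative order, so the Python A raises RecursionError for K < 0 and
-- for K at or beyond Python's default recursion limit 1000 (measured: the deepest returning
-- top-level call is K = 997); Pre_ keeps 0 ≤ K ≤ 970, just under the measured crash point,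
-- since the exact crash K shifts down by the caller's current stack depth.
def Pre_calculate_derivative (coefficients : List Int) (K : Int) : Prop := 0 ≤ K ∧ K ≤ 970
instance (coefficients : List Int) (K : Int) : Decidable (Pre_calculate_derivative coefficients K) := by unfold Pre_calculate_derivative; infer_instance
def pvWitness_calculate_derivative : List Int × Int := ([1, 2, 3, 4], 2)

def Spec_calculate_derivative (coefficients : List Int) (K : Int) (out : List Int) : Prop := out = calculate_derivative_alt coefficients K
instance (coefficients : List Int) (K : Int) (out : List Int) : Decidable (Spec_calculate_derivative coefficients K out) := by unfold Spec_calculate_derivative; infer_instance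

-- ===== CLAIM (what is proved, stated in full; the proofs are below) =====
def Claim_equal_calculate_derivative : Prop := ∀ (coefficients : List Int) (K : Int), Dom_calculate_derivative coefficients K → Pre_calculate_derivative coefficients K → Spec_calculate_derivative coefficients K (calculate_derivative coefficients K)

-- ===== LEMMAS AND PROOFS =====

-- closed form (j+1)*(j+2)*...*(j+k) both characterisations are phrased with
def prodRange (a : Int) : Nat → Int
  | 0 => 1
  | k + 1 => prodRange a k * (a + k)

-- the value both programs compute at output index j, for derivative order k
def specFn (k : Nat) (c : List Int) : List Int :=
  (List.range c.length).map
    (fun j => if j + k < c.length then c.getD (j + k) 0 * prodRange ((j : Int) + 1) k else 0)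

def pvIter : Nat → List Int → List Int
  | 0, c => c
  | k + 1, c => pvIter k (derivStep c)

theorem calcAux_eq_pvIter (k : Nat) (c : List Int) : calcAux k c (k : Int) = pvIter k c := by
  induction k generalizing c with
  | zero =>
    unfold calcAux
    rw [if_pos (show ((0 : Nat) : Int) = 0 by norm_num)]
    rfl
  | succ f ih =>
    have h : ((f + 1 : Nat) : Int) ≠ 0 := by positivity
    unfold calcAux
    rw [if_neg h]
    show calcAux f (derivStep c) (((f + 1 : Nat) : Int) - 1) = pvIter (f + 1) c
    rw [show ((f + 1 : Nat) : Int) - 1 = (f : Int) by push_cast; ring]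
    exact ih (derivStep c)

theorem set_map_range (n j : Nat) (f : Nat → Int) (v : Int) :
    ((List.range n).map f).set j v
      = (List.range n).map (fun i => if i = j then v else f i) := by
  apply List.ext_getElem
  · simp
  · intro i h1 h2
    simp only [List.getElem_set, List.getElem_map, List.getElem_range]
    split_ifs with h3 h4 h4
    · rfl
    · exact absurd h3.symm h4
    · exact absurd h4.symm h3
    · rfl

theorem map_range_congr (n : Nat) (f g : Nat → Int) (h : ∀ i, i < n → f i = g i) :
    (List.range n).map f = (List.range n).map g :=
  List.map_congr_left (fun i hi => h i (List.mem_range.mp hi))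

theorem replicate_eq_map_range (n : Nat) :
    (List.replicate n (0 : Int)) = (List.range n).map (fun _ => 0) := by
  simp [List.map_const']

theorem getD_map_range (n i : Nat) (f : Nat → Int) (h : i < n) :
    ((List.range n).map f).getD i 0 = f i := by
  rw [List.getD_eq_getElem?_getD, List.getElem?_map, List.getElem?_range h]
  rfl

theorem pySetD_last (xs : List Int) (v : Int) (h : xs ≠ []) :
    PySem.List.pySetD xs (-1) v = xs.set (xs.length - 1) v := by
  have hlen : 1 ≤ xs.length := List.length_pos_iff.mpr h
  simp only [PySem.List.pySetD, PySem.List.pySet?, PySem.List.pyIdx?]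
  rw [if_neg (by omega), if_pos (by omega : -(xs.length : Int) ≤ -1)]
  rfl

theorem prodRange_one (a : Int) : prodRange a 1 = a := by
  simp [prodRange]

-- characterisation of A's loop (one derivative step)
theorem derivStep_eq (c : List Int) : derivStep c = specFn 1 c := by
  have key : ∀ m : Nat, m ≤ c.length →
      (PySem.List.pyRange 0 (m : Int) 1).foldl
        (fun nw i =>
          if PySem.List.pyGetD c i 0 ≠ 0 then
            PySem.List.pySetD nw (i - 1) (i * PySem.List.pyGetD c i 0)
          else nw)
        (List.replicate c.length 0)
      = (List.range c.length).map
          (fun j => if j + 1 < m then ((j : Int) + 1) * c.getD (j + 1) 0 else 0) := by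
    intro m hm
    induction m with
    | zero =>
      rw [show ((0 : Nat) : Int) = 0 by norm_num,
        PySem.List.pyRange_one_eq_nil (le_refl (0 : Int)), replicate_eq_map_range]
      simp only [List.foldl_nil]
      apply map_range_congr; intro i _
      exact (if_neg (by omega)).symm
    | succ m ih =>
      rw [show ((m + 1 : Nat) : Int) = (m : Int) + 1 by push_cast; ring,
        PySem.List.pyRange_one_succ_right (by positivity), List.foldl_append,
        ih (by omega)]
      simp only [List.foldl_cons, List.foldl_nil, PySem.List.pyGetD_natCast]
      have hmlt : m < c.length := by omega
      by_cases hc : c.getD m 0 ≠ 0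
      · rw [if_pos hc]
        rcases Nat.eq_zero_or_pos m with hm0 | hmpos
        · -- i = 0: Python writes new[-1] = 0 * c[0] = 0, i.e. the last slot gets 0
          subst hm0
          rw [show ((0 : Nat) : Int) - 1 = -1 by norm_num,
            pySetD_last _ _ (List.ne_nil_of_length_pos (by simpa using hmlt)),
            List.length_map, List.length_range, set_map_range]
          apply map_range_congr; intro i hi
          split_ifs with h1 h2 h2 <;>
            first
            | rfl
            | omega
            | (push_cast; ring)
        · -- i = m ≥ 1: writes slot m-1 with value m * c[m]
          rw [show ((m : Nat) : Int) - 1 = ((m - 1 : Nat) : Int) by omega,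
            PySem.List.pySetD_natCast, set_map_range]
          apply map_range_congr; intro i hi
          split_ifs with h1 h2 h2 <;>
            first
            | rfl
            | omega
            | (subst h1
               rw [show m - 1 + 1 = m by omega]
               congr 1
               omega)
      · rw [if_neg hc]
        push_neg at hc
        apply map_range_congr; intro i hi
        split_ifs with h1 h2 h2 <;>
          first
          | rfl
          | omega
          | (rw [show i + 1 = m by omega, hc, mul_zero])
  rw [derivStep, key c.length le_rfl, specFn]
  apply map_range_congr; intro i hi
  split_ifs with h1
  · rw [prodRange_one]; ring
  · rfl

theorem specFn_length (k : Nat) (c : List Int) : (specFn k c).length = c.length := by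
  simp [specFn]

theorem specFn_getElem (k : Nat) (c : List Int) (j : Nat) (h : j < (specFn k c).length) :
    (specFn k c)[j] = if j + k < c.length then c.getD (j + k) 0 * prodRange ((j : Int) + 1) k else 0 := by
  simp only [specFn, List.getElem_map, List.getElem_range]

theorem specFn_getD (k : Nat) (c : List Int) (j : Nat) (h : j < c.length) :
    (specFn k c).getD j 0
      = if j + k < c.length then c.getD (j + k) 0 * prodRange ((j : Int) + 1) k else 0 := by
  rw [specFn, getD_map_range _ _ _ h]

theorem specFn_zero (c : List Int) : specFn 0 c = c := by
  apply List.ext_getElem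
  · simp [specFn]
  · intro i h1 h2
    rw [specFn_getElem 0 c i h1, if_pos (by omega)]
    simp only [Nat.add_zero]
    rw [List.getD_eq_getElem _ _ h2]
    simp [prodRange]

-- one derivative step followed by k more is k+1 of them
theorem specFn_comp (k : Nat) (c : List Int) :
    specFn k (specFn 1 c) = specFn (k + 1) c := by
  have hlen : (specFn 1 c).length = c.length := specFn_length 1 c
  apply List.ext_getElem
  · simp [specFn_length, hlen]
  · intro j h1 h2
    have hj : j < c.length := by rw [specFn_length] at h2; exact h2
    rw [specFn_getElem, specFn_getElem, hlen]
    by_cases hjk : j + k < c.length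
    · rw [if_pos hjk, specFn_getD 1 c (j + k) hjk]
      by_cases hjk1 : j + k + 1 < c.length
      · rw [if_pos hjk1, if_pos (by omega : j + (k + 1) < c.length),
          show j + (k + 1) = j + k + 1 by omega,
          show prodRange ((j : Int) + 1) (k + 1) = prodRange ((j : Int) + 1) k * ((j : Int) + 1 + k) from rfl,
          prodRange_one]
        push_cast
        ring
      · rw [if_neg hjk1, if_neg (by omega : ¬ j + (k + 1) < c.length), zero_mul]
    · rw [if_neg hjk, if_neg (by omega : ¬ j + (k + 1) < c.length)]

theorem pvIter_eq (k : Nat) (c : List Int) : pvIter k c = specFn k c := by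
  induction k generalizing c with
  | zero => rw [pvIter, specFn_zero]
  | succ f ih => rw [pvIter, ih, derivStep_eq, specFn_comp]

theorem fallingProd_eq (j : Int) (k : Nat) : fallingProd j (k : Int) = prodRange (j + 1) k := by
  induction k with
  | zero =>
    rw [fallingProd, show j + ((0 : Nat) : Int) + 1 = j + 1 by push_cast; ring,
      PySem.List.pyRange_one_eq_nil (le_refl (j + 1))]
    rfl
  | succ f ih =>
    rw [fallingProd, show j + ((f + 1 : Nat) : Int) + 1 = (j + (f : Int) + 1) + 1 by push_cast; ring,
      PySem.List.pyRange_one_succ_right (by omega), List.foldl_append]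
    simp only [List.foldl_cons, List.foldl_nil]
    rw [← fallingProd, ih]
    show prodRange (j + 1) f * (j + (f : Int) + 1) = prodRange (j + 1) f * ((j + 1) + (f : Int))
    ring

-- characterisation of B's loop
theorem alt_eq (c : List Int) (K : Int) (hK : 1 ≤ K) :
    calculate_derivative_alt c K = specFn K.toNat c := by
  have hK0 : K ≠ 0 := by omega
  have hcast : ((K.toNat : Nat) : Int) = K := Int.toNat_of_nonneg (by omega)
  have key : ∀ m : Nat, m ≤ c.length →
      (PySem.List.pyRange 0 (m : Int) 1).foldl
        (fun res j =>
          if j + K < (c.length : Int) then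
            PySem.List.pySetD res j (PySem.List.pyGetD c (j + K) 0 * fallingProd j K)
          else res)
        (List.replicate c.length 0)
      = (List.range c.length).map
          (fun j => if j < m
              then (if j + K.toNat < c.length
                    then c.getD (j + K.toNat) 0 * prodRange ((j : Int) + 1) K.toNat else 0)
              else 0) := by
    intro m hm
    induction m with
    | zero =>
      rw [show ((0 : Nat) : Int) = 0 by norm_num,
        PySem.List.pyRange_one_eq_nil (le_refl (0 : Int)), replicate_eq_map_range]
      simp only [List.foldl_nil]
      apply map_range_congr; intro i _
      exact (if_neg (by omega)).symm
    | succ m ih =>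
      rw [show ((m + 1 : Nat) : Int) = (m : Int) + 1 by push_cast; ring,
        PySem.List.pyRange_one_succ_right (by positivity), List.foldl_append,
        ih (by omega)]
      simp only [List.foldl_cons, List.foldl_nil]
      by_cases hg : (m : Int) + K < (c.length : Int)
      · rw [if_pos hg]
        have hmk : m + K.toNat < c.length := by omega
        rw [show (m : Int) + K = ((m + K.toNat : Nat) : Int) by push_cast [hcast]; ring,
          PySem.List.pyGetD_natCast, PySem.List.pySetD_natCast, set_map_range]
        apply map_range_congr; intro i hi
        have hfp : fallingProd ((m : Nat) : Int) K = prodRange (((m : Nat) : Int) + 1) K.toNat := by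
          rw [← hcast, Int.toNat_natCast]
          exact fallingProd_eq _ _
        split_ifs with h1 h2 h3 h2 h3 <;>
          first
          | rfl
          | omega
          | (subst h1; rw [hfp])
      · rw [if_neg hg]
        apply map_range_congr; intro i hi
        split_ifs with h1 h2 h3 h2 h3 <;> first | rfl | omega
  rw [calculate_derivative_alt, if_neg hK0, key c.length le_rfl, specFn]
  apply map_range_congr; intro i hi
  split_ifs with h1 h2 h2 <;> first | rfl | omega

-- ===== VERDICT (by name: the statement is the Claim_ definition above) =====
theorem calculate_derivative_spec : Claim_equal_calculate_derivative := by
  intro c K _ hpre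
  unfold Spec_calculate_derivative
  obtain ⟨hK0, _⟩ := hpre
  by_cases h : K = 0
  · subst h
    rw [calculate_derivative, calculate_derivative_alt, if_pos rfl]
    unfold calcAux
    rw [if_pos rfl]
  · have h1 : 1 ≤ K := by omega
    have hcast : ((K.toNat : Nat) : Int) = K := Int.toNat_of_nonneg hK0
    rw [calculate_derivative, alt_eq c K h1, ← hcast, Int.toNat_natCast, calcAux_eq_pvIter,
      pvIter_eq]
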